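-- pv_equiv track=rewrite | github.com/gunesevitan/cs | [Book] Think Python - Allen B. Downey/Chapter 9 - Case Study Word Play.py | avoids
-- ===== SOURCE A (Python) =====
-- def avoids(word, forbidden_letters):
--     i = 0
--     while i < len(word):
--         if word[i] in forbidden_letters:
--             return False
--         else:
--             i += 1
--     return True
-- ===== SOURCE B (Python) =====
-- def avoids(word, forbidden_letters):
--     return set(word).isdisjoint(forbidden_letters)
-- ===== Notes on version B (the rewrite author's own statement) =====
-- stated objective: idiomatic
-- what changed: Replaces the indexed while-loop with early return by building the set of the word's characters once and testing set disjointness against the forbidden letters.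
import Mathlib
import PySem

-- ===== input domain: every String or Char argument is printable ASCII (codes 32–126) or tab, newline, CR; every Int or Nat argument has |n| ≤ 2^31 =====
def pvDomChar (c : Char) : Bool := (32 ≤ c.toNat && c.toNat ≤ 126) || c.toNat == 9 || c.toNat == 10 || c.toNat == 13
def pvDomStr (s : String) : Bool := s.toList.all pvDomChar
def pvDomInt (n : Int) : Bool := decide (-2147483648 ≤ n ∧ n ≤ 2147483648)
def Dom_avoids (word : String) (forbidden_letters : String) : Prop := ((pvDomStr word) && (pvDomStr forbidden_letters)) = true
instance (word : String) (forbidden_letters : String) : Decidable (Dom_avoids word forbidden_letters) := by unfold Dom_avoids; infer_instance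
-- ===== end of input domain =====

-- B replaces the indexed while-loop with a set-disjointness test (idiomatic; same result).

-- ===== PORT A =====
-- the while-loop of A: index i scans word, returning False on the first forbidden character
def avoidsLoop (w : List Char) (f : List Char) (i : Nat) : Bool :=
  if h : i < w.length then
    if f.contains w[i] then false else avoidsLoop w f (i + 1)
  else true
termination_by w.length - i

def avoids (word : String) (forbidden_letters : String) : Bool :=
  avoidsLoop word.toList forbidden_letters.toList 0

-- ===== PORT B =====
def avoids_alt (word : String) (forbidden_letters : String) : Bool :=
  PySem.Set.isdisjoint (PySem.Set.ofList word.toList) forbidden_letters.toList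

-- ===== PRECONDITION & SPEC =====
def Spec_avoids (word : String) (forbidden_letters : String) (out : Bool) : Prop := out = avoids_alt word forbidden_letters
instance (word : String) (forbidden_letters : String) (out : Bool) : Decidable (Spec_avoids word forbidden_letters out) := by unfold Spec_avoids; infer_instance

-- ===== CLAIM (what is proved, stated in full; the proofs are below) =====
def Claim_equal_avoids : Prop := ∀ (word : String) (forbidden_letters : String), Dom_avoids word forbidden_letters → Spec_avoids word forbidden_letters (avoids word forbidden_letters)

-- ===== LEMMAS AND PROOFS =====

theorem avoidsLoop_eq_true_iff (w f : List Char) (i : Nat) :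
    avoidsLoop w f i = true ↔ ∀ j, i ≤ j → (h : j < w.length) → w[j] ∉ f := by
  fun_induction avoidsLoop w f i with
  | case1 i h hc =>
    simp only [Bool.false_eq_true, false_iff]
    push Not
    exact ⟨i, le_refl i, h, by simpa using hc⟩
  | case2 i h hc ih =>
    rw [ih]
    constructor
    · intro hj j hij hlt
      rcases Nat.eq_or_lt_of_le hij with rfl | hlt'
      · simpa using hc
      · exact hj j hlt' hlt
    · intro hj j hij hlt
      exact hj j (Nat.le_of_succ_le hij) hlt
  | case3 i h =>
    simp only [true_iff]
    intro j _ hlt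
    omega

theorem avoids_spec : Claim_equal_avoids := by
  intro word forbidden _
  unfold Spec_avoids avoids avoids_alt
  rw [Bool.eq_iff_iff, avoidsLoop_eq_true_iff, PySem.Set.isdisjoint_iff]
  constructor
  · intro h x hx
    rw [PySem.Set.mem_ofList] at hx
    rcases List.mem_iff_getElem.mp hx with ⟨j, hlt, rfl⟩
    exact h j (Nat.zero_le j) hlt
  · intro h j _ hlt
    exact h _ (by simpa [PySem.Set.mem_ofList] using List.getElem_mem hlt)
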